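-- pv_equiv track=rewrite | github.com/Hee198/subway | station8.py | print_path_with_lines
-- ===== SOURCE A (Python) =====
-- def print_path_with_lines(route, landscape):
--     result = []
--     prev_line = None
--     current_segment = []
--
--     for i in range(len(route) - 1):
--         current = route[i]
--         next_station = route[i + 1]
--         connections = [conn for conn in landscape[current] if conn['station'] == next_station]
--         if not connections:
--             continue
--         connection = next((conn for conn in connections if conn['line'] == prev_line), connections[0])
--         line = connection['line']
--         if prev_line is not None and line != prev_line:
--             current_segment.append(current)
--             result.append(f"[{prev_line}]\n {' → '.join(current_segment)}")
--             current_segment = []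
--         current_segment.append(current)
--         prev_line = line
--
--     current_segment.append(route[-1])
--     result.append(f"[{prev_line}]\n {' → '.join(current_segment)}")
--     return "\n".join(result)
-- ===== SOURCE B (Python) =====
-- def print_path_with_lines(route, landscape):
--     # Phase 1: materialize the (station, chosen line) decisions, one per usable edge.
--     chosen = []
--     prev_line = None
--     for cur, nxt in zip(route, route[1:]):
--         conns = [c for c in landscape[cur] if c['station'] == nxt]
--         if conns:
--             conn = next((c for c in conns if c['line'] == prev_line), conns[0])
--             prev_line = conn['line']
--             chosen.append((cur, prev_line))
--     if not chosen:
--         return f"[None]\n {route[-1]}"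
--     # Phase 2: group consecutive equal lines, duplicating the boundary station.
--     segments = []
--     for st, ln in chosen:
--         if segments:
--             segments[-1][1].append(st)
--         if not segments or segments[-1][0] != ln:
--             segments.append((ln, [st]))
--     segments[-1][1].append(route[-1])
--     return "\n".join(f"[{ln}]\n {' → '.join(sts)}" for ln, sts in segments)
-- ===== Notes on version B (the rewrite author's own statement) =====
-- stated objective: alternative
-- what changed: A builds the formatted output inside one fused index loop that closes a segment whenever the line changes; B first materializes the list of (station, chosen line) decisions in one pass over adjacent pairs, then groups consecutive equal lines into segments (duplicating boundary stations) and formats them in a separate phase.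
import Mathlib
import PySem

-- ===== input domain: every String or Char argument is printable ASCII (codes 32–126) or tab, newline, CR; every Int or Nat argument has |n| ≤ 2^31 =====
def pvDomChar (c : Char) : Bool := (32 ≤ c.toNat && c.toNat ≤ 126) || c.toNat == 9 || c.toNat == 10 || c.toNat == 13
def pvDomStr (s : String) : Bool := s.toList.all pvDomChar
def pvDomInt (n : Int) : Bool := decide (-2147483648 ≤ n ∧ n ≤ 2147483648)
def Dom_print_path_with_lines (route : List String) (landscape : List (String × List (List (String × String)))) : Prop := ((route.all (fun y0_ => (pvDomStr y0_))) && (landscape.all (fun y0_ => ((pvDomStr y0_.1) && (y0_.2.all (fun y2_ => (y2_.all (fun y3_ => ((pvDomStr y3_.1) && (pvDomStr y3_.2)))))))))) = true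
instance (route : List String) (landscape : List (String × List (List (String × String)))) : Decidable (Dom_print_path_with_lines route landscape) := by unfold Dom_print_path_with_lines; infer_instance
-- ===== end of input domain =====

-- B re-decomposes A's fused formatting loop into two materialized phases (choose lines, then group
-- consecutive equal lines into segments); equal return value on Pre_, no side effects involved.

-- ===== PORT A =====
-- shared edge-selection helpers: both Pythons contain this identical code
-- `[conn for conn in landscape[current] if conn['station'] == next_station]`
-- first-match association-list lookup (Python dict lookup under the List (K × V) convention)
def pvLookup {ν : Type} (l : List (String × ν)) (k : String) : Option ν :=
  (l.find? (fun p => p.1 == k)).map (fun p => p.2)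

def pvConns (landscape : List (String × List (List (String × String)))) (cur nxt : String) :
    List (List (String × String)) :=
  ((pvLookup landscape cur).getD []).filter (fun c => pvLookup c "station" == some nxt)

-- `next((conn for conn in connections if conn['line'] == prev_line), connections[0])['line']`
-- (`conn['line'] == prev_line` is False in Python when prev_line is None; the `.getD ""` defaults
-- are only reached where the Python raises KeyError, which Pre_ excludes)
def pvPick (prev : Option String) (c0 : List (String × String))
    (conns : List (List (String × String))) : String :=
  (pvLookup
    ((conns.find? (fun c => prev.any (fun p => pvLookup c "line" == some p))).getD c0)
    "line").getD ""

-- `f"[{prev_line}]\n {' → '.join(seg)}"` with prev_line an Option (None prints as "None")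
def fmtA (pl : Option String) (seg : List String) : String :=
  "[" ++ (match pl with | none => "None" | some l => l) ++ "]\n " ++ PySem.Str.join " → " seg

-- one iteration of A's loop body, state (result, prev_line, current_segment)
def stepA (landscape : List (String × List (List (String × String))))
    (st : List String × Option String × List String) (p : String × String) :
    List String × Option String × List String :=
  let connections := pvConns landscape p.1 p.2
  match connections with
  | [] => st
  | c0 :: _ =>
    let line := pvPick st.2.1 c0 connections
    match st.2.1 with
    | some pl =>
        if line = pl then (st.1, some line, st.2.2 ++ [p.1])
        else (st.1 ++ [fmtA (some pl) (st.2.2 ++ [p.1])], some line, [p.1])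
    | none => (st.1, some line, st.2.2 ++ [p.1])

def print_path_with_lines (route : List String) (landscape : List (String × List (List (String × String)))) : String :=
  -- for i in range(len(route) - 1): … (route[i], route[i+1]); defaults unreachable in range
  let st := (List.range (route.length - 1)).foldl
      (fun st i => stepA landscape st (route.getD i "", route.getD (i+1) "")) ([], none, [])
  -- current_segment.append(route[-1]); result.append(…); "\n".join(result)
  PySem.Str.join "\n" (st.1 ++ [fmtA st.2.1 (st.2.2 ++ [route.getLastD ""])])

-- ===== PORT B =====
-- phase 1 step: record (station, chosen line); skipped edges leave the state untouched
def stepC (landscape : List (String × List (List (String × String))))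
    (st : List (String × String) × Option String) (p : String × String) :
    List (String × String) × Option String :=
  let conns := pvConns landscape p.1 p.2
  match conns with
  | [] => st
  | c0 :: _ =>
    let line := pvPick st.2 c0 conns
    (st.1 ++ [(p.1, line)], some line)

-- phase 2 step: segments kept most-recent-first (Python's segments[-1] is the head here)
def groupStep (segs : List (String × List String)) (x : String × String) :
    List (String × List String) :=
  match segs with
  | [] => [(x.2, [x.1])]
  | (l, ss) :: rest =>
      if l = x.2 then (l, ss ++ [x.1]) :: rest
      else (x.2, [x.1]) :: (l, ss ++ [x.1]) :: rest

-- `f"[{ln}]\n {' → '.join(sts)}"` for a grouped segment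
def fmtB (l : String) (sts : List String) : String :=
  "[" ++ l ++ "]\n " ++ PySem.Str.join " → " sts

def print_path_with_lines_alt (route : List String) (landscape : List (String × List (List (String × String)))) : String :=
  let chosen := ((route.zip route.tail).foldl (stepC landscape) ([], none)).1
  match chosen.foldl groupStep [] with
  | [] => "[None]\n " ++ route.getLastD ""
  | (l, ss) :: rest =>
      PySem.Str.join "\n"
        (((l, ss ++ [route.getLastD ""]) :: rest).reverse.map (fun s => fmtB s.1 s.2))

-- ===== PRECONDITION & SPEC =====
-- Pre_ excludes the inputs where A raises: empty route (route[-1]), a traversed station missing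
-- from landscape (KeyError), or an accessed connection dict missing 'station'/'line' (KeyError);
-- it conservatively also excludes inputs where a matching connection after the lazily-found match
-- lacks 'line' (there A happens to return, and B returns the same value).
def pvEdgeOK (landscape : List (String × List (List (String × String)))) (cur nxt : String) : Bool :=
  match pvLookup landscape cur with
  | none => false
  | some conns => conns.all (fun c =>
      (pvLookup c "station").isSome &&
      (pvLookup c "station" != some nxt || (pvLookup c "line").isSome))

def Pre_print_path_with_lines (route : List String) (landscape : List (String × List (List (String × String)))) : Prop :=
  route ≠ [] ∧ ((route.zip route.tail).all (fun p => pvEdgeOK landscape p.1 p.2)) = true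

instance (route : List String) (landscape : List (String × List (List (String × String)))) : Decidable (Pre_print_path_with_lines route landscape) := by
  unfold Pre_print_path_with_lines; infer_instance

def pvWitness_print_path_with_lines : List String × (List (String × List (List (String × String)))) :=
  (["a", "b"], [("a", [[("station", "b"), ("line", "1")]])])

def Spec_print_path_with_lines (route : List String) (landscape : List (String × List (List (String × String)))) (out : String) : Prop := out = print_path_with_lines_alt route landscape
instance (route : List String) (landscape : List (String × List (List (String × String)))) (out : String) : Decidable (Spec_print_path_with_lines route landscape out) := by unfold Spec_print_path_with_lines; infer_instance

-- ===== CLAIM (what is proved, stated in full; the proofs are below) =====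
def Claim_equal_print_path_with_lines : Prop := ∀ (route : List String) (landscape : List (String × List (List (String × String)))), Dom_print_path_with_lines route landscape → Pre_print_path_with_lines route landscape → Spec_print_path_with_lines route landscape (print_path_with_lines route landscape)

-- ===== LEMMAS AND PROOFS =====

-- the invariant tying A's loop state to the grouping of B's materialized choices
def IInv (c : List (String × String)) (st : List String × Option String × List String) : Prop :=
  match c.foldl groupStep [] with
  | [] => st = ([], none, [])
  | (l, ss) :: rest =>
      st.1 = rest.reverse.map (fun s => fmtB s.1 s.2) ∧ st.2.1 = some l ∧ st.2.2 = ss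

lemma fmtA_some (l : String) (seg : List String) : fmtA (some l) seg = fmtB l seg := rfl

lemma range_pairs (l : List String) (d : String) :
    (List.range (l.length - 1)).map (fun i => (l.getD i d, l.getD (i+1) d)) = l.zip l.tail := by
  match l with
  | [] => simp
  | [a] => simp
  | a :: b :: r =>
    have ih := range_pairs (b :: r) d
    simp only [List.length_cons, Nat.add_sub_cancel] at *
    rw [List.range_succ_eq_map]
    simp only [List.map_cons, List.map_map]
    simp only [List.getD_cons_zero, List.getD_cons_succ]
    simp [List.zip] at ih ⊢
    exact ih

lemma join_single (sep s : String) : PySem.Str.join sep [s] = s := by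
  simp [PySem.Str.join]

lemma inv_step (L : List (String × List (List (String × String))))
    (c : List (String × String)) (result : List String) (prev : Option String)
    (seg : List String) (p : String × String) (h : IInv c (result, prev, seg)) :
    IInv (stepC L (c, prev) p).1 (stepA L (result, prev, seg) p) ∧
      (stepC L (c, prev) p).2 = (stepA L (result, prev, seg) p).2.1 := by
  unfold stepA stepC
  cases hconns : pvConns L p.1 p.2 with
  | nil => exact ⟨h, rfl⟩
  | cons c0 cs =>
    simp only
    unfold IInv at h
    cases hg : c.foldl groupStep [] with
    | nil =>
      rw [hg] at h
      simp only [Prod.mk.injEq] at h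
      obtain ⟨h1, h2, h3⟩ := h
      subst h1; subst h2; subst h3
      constructor
      · unfold IInv
        simp [List.foldl_append, hg, groupStep]
      · rfl
    | cons hd rest =>
      obtain ⟨l, ss⟩ := hd
      rw [hg] at h
      obtain ⟨h1, h2, h3⟩ := h
      simp only at h1 h2 h3
      subst h1; subst h3; subst h2
      simp only
      by_cases hl : pvPick (some l) c0 (c0 :: cs) = l
      · rw [if_pos hl]
        constructor
        · unfold IInv
          simp only [List.foldl_append, hg, List.foldl_cons, List.foldl_nil, groupStep]
          rw [if_pos hl.symm]
          simp [hl]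
        · simp [hl]
      · rw [if_neg hl]
        constructor
        · unfold IInv
          simp only [List.foldl_append, hg, List.foldl_cons, List.foldl_nil, groupStep]
          rw [if_neg (fun hh => hl hh.symm)]
          refine ⟨?_, rfl, rfl⟩
          simp [fmtA_some]
        · rfl

lemma inv_fold (L : List (String × List (List (String × String)))) :
    ∀ (pairs : List (String × String)) (c : List (String × String))
      (result : List String) (prev : Option String) (seg : List String),
      IInv c (result, prev, seg) →
      IInv (pairs.foldl (stepC L) (c, prev)).1 (pairs.foldl (stepA L) (result, prev, seg)) := by
  intro pairs
  induction pairs with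
  | nil => intro c result prev seg h; exact h
  | cons p ps ih =>
    intro c result prev seg h
    obtain ⟨hstep, hprev⟩ := inv_step L c result prev seg p h
    simp only [List.foldl_cons]
    have h2 := ih (stepC L (c, prev) p).1 (stepA L (result, prev, seg) p).1
      (stepA L (result, prev, seg) p).2.1 (stepA L (result, prev, seg) p).2.2 hstep
    rw [show stepC L (c, prev) p
        = ((stepC L (c, prev) p).1, (stepA L (result, prev, seg) p).2.1) from by rw [← hprev]]
    exact h2

-- ===== VERDICT (by name: the statement is the Claim_ definition above) =====
theorem print_path_with_lines_spec : Claim_equal_print_path_with_lines := by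
  intro route landscape _hdom _hpre
  unfold Spec_print_path_with_lines
  unfold print_path_with_lines print_path_with_lines_alt
  simp only
  have hfold : (List.range (route.length - 1)).foldl
      (fun st i => stepA landscape st (route.getD i "", route.getD (i+1) ""))
      ([], none, []) = (route.zip route.tail).foldl (stepA landscape) ([], none, []) := by
    conv_rhs => rw [← range_pairs route "", List.foldl_map]
  rw [hfold]
  have hinv := inv_fold landscape (route.zip route.tail) [] [] none []
    (by unfold IInv; simp)
  set sa := (route.zip route.tail).foldl (stepA landscape) ([], none, []) with hsa
  set sc := (route.zip route.tail).foldl (stepC landscape) ([], none) with hsc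
  unfold IInv at hinv
  cases hg : sc.1.foldl groupStep [] with
  | nil =>
    rw [hg] at hinv
    rw [hinv]
    simp [fmtA, join_single]
  | cons hd rest =>
    obtain ⟨l, ss⟩ := hd
    rw [hg] at hinv
    obtain ⟨h1, h2, h3⟩ := hinv
    rw [h1, h2, h3, fmtA_some]
    simp
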